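-- pv_equiv track=rewrite | github.com/ZachLark/erudite-ecb-api | integrations/event_processor.py | _generate_issue_labels
-- ===== SOURCE A (Python) =====
-- from typing import Dict, Any, List, Optional
--
-- def _generate_issue_labels(title: str, body: str) -> List[str]:
--     """Generate labels based on issue content."""
--     labels = []
--
--     # Priority labels
--     if any(word in title.lower() for word in ["urgent", "critical", "emergency"]):
--         labels.append("priority:high")
--
--     # Type labels
--     if "bug" in title.lower() or "error" in body.lower():
--         labels.append("type:bug")
--     elif "feature" in title.lower() or "enhancement" in body.lower():
--         labels.append("type:feature")
--     elif "doc" in title.lower() or "documentation" in body.lower():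
--         labels.append("type:documentation")
--
--     return labels
-- ===== SOURCE B (Python) =====
-- KEYWORDS = [
--     ("urgent", True, "priority:high"),
--     ("critical", True, "priority:high"),
--     ("emergency", True, "priority:high"),
--     ("bug", True, "type:bug"),
--     ("error", False, "type:bug"),
--     ("feature", True, "type:feature"),
--     ("enhancement", False, "type:feature"),
--     ("doc", True, "type:documentation"),
--     ("documentation", False, "type:documentation"),
-- ]
--
-- RANKED_TYPES = ["type:bug", "type:feature", "type:documentation"]
--
-- def _generate_issue_labels(title: str, body: str):
--     """Exhaustively match every keyword, then select labels by rank."""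
--     t, b = title.lower(), body.lower()
--     hits = [lab for kw, in_title, lab in KEYWORDS if kw in (t if in_title else b)]
--     matched_types = [lab for lab in RANKED_TYPES if lab in hits]
--     return (["priority:high"] if "priority:high" in hits else []) + matched_types[:1]
-- ===== Notes on version B (the rewrite author's own statement) =====
-- stated objective: alternative
-- what changed: Instead of a short-circuiting if/elif chain, B exhaustively matches a flat keyword->label index against the lowered title/body to collect all hit labels, then selects the output by rank (priority label independently, the best-ranked type label via filter-and-take).
import Mathlib
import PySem

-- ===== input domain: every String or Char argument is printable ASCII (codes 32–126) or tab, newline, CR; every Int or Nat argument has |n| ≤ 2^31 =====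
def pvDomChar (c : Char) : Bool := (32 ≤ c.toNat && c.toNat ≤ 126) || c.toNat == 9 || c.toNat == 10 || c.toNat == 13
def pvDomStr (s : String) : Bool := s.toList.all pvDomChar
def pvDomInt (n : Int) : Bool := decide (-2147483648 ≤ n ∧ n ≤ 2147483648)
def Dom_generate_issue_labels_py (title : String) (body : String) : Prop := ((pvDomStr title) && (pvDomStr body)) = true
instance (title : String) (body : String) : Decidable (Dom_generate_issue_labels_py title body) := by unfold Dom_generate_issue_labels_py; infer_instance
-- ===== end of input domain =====

-- B replaces A's short-circuiting if/elif chain by an exhaustive flat keyword->label index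
-- matched against the lowered texts, followed by rank-based selection (alternative decomposition, same cost).

-- ===== PORT A =====
def generate_issue_labels_py (title : String) (body : String) : List String :=
  let labels : List String := []
  let labels :=
    if (["urgent", "critical", "emergency"].any (fun w => PySem.Str.isIn w (PySem.Str.lower title)))
    then labels ++ ["priority:high"] else labels
  if PySem.Str.isIn "bug" (PySem.Str.lower title) || PySem.Str.isIn "error" (PySem.Str.lower body) then
    labels ++ ["type:bug"]
  else if PySem.Str.isIn "feature" (PySem.Str.lower title) || PySem.Str.isIn "enhancement" (PySem.Str.lower body) then
    labels ++ ["type:feature"]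
  else if PySem.Str.isIn "doc" (PySem.Str.lower title) || PySem.Str.isIn "documentation" (PySem.Str.lower body) then
    labels ++ ["type:documentation"]
  else labels

-- ===== PORT B =====
-- flat keyword index: (keyword, matched against title? (else body), label)
def pvKeywords : List (String × Bool × String) :=
  [("urgent", true, "priority:high"),
   ("critical", true, "priority:high"),
   ("emergency", true, "priority:high"),
   ("bug", true, "type:bug"),
   ("error", false, "type:bug"),
   ("feature", true, "type:feature"),
   ("enhancement", false, "type:feature"),
   ("doc", true, "type:documentation"),
   ("documentation", false, "type:documentation")]

def pvRankedTypes : List String := ["type:bug", "type:feature", "type:documentation"]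

def generate_issue_labels_py_alt (title : String) (body : String) : List String :=
  let t := PySem.Str.lower title
  let b := PySem.Str.lower body
  let hits := (pvKeywords.filter
      (fun x => PySem.Str.isIn x.1 (if x.2.1 then t else b))).map (fun x => x.2.2)
  let matchedTypes := pvRankedTypes.filter (fun lab => hits.contains lab)
  (if hits.contains "priority:high" then ["priority:high"] else []) ++ matchedTypes.take 1

-- ===== PRECONDITION & SPEC =====
def Spec_generate_issue_labels_py (title : String) (body : String) (out : List String) : Prop := out = generate_issue_labels_py_alt title body
instance (title : String) (body : String) (out : List String) : Decidable (Spec_generate_issue_labels_py title body out) := by unfold Spec_generate_issue_labels_py; infer_instance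

-- ===== CLAIM (what is proved, stated in full; the proofs are below) =====
def Claim_equal_generate_issue_labels_py : Prop := ∀ (title : String) (body : String), Dom_generate_issue_labels_py title body → Spec_generate_issue_labels_py title body (generate_issue_labels_py title body)

-- ===== LEMMAS AND PROOFS =====

-- ===== VERDICT (by name: the statement is the Claim_ definition above) =====
set_option maxHeartbeats 2000000 in
theorem generate_issue_labels_py_spec : Claim_equal_generate_issue_labels_py := by
  intro title body _
  unfold Spec_generate_issue_labels_py generate_issue_labels_py generate_issue_labels_py_alt pvKeywords pvRankedTypes
  simp only [List.any_cons, List.any_nil, Bool.or_false, List.filter_cons, List.filter_nil,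
    if_true, Bool.false_eq_true, if_false]
  generalize PySem.Str.isIn "urgent" (PySem.Str.lower title) = a1
  generalize PySem.Str.isIn "critical" (PySem.Str.lower title) = a2
  generalize PySem.Str.isIn "emergency" (PySem.Str.lower title) = a3
  generalize PySem.Str.isIn "bug" (PySem.Str.lower title) = a4
  generalize PySem.Str.isIn "error" (PySem.Str.lower body) = a5
  generalize PySem.Str.isIn "feature" (PySem.Str.lower title) = a6
  generalize PySem.Str.isIn "enhancement" (PySem.Str.lower body) = a7
  generalize PySem.Str.isIn "doc" (PySem.Str.lower title) = a8
  generalize PySem.Str.isIn "documentation" (PySem.Str.lower body) = a9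
  revert a1 a2 a3 a4 a5 a6 a7 a8 a9
  decide
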